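-- pv_equiv track=rewrite | github.com/akio7624/YomeiriTools | utils/Utils.py | get_root_files_padding_count
-- ===== SOURCE A (Python) =====
-- def get_root_files_padding_count(size: int) -> int:
--     if size % 2048 == 0:
--         return 0
--
--     n = int(size / 2048)
--
--     while True:
--         block_size = (n * 2048)
--         if size <= block_size:
--             return block_size - size
--         n += 1
-- ===== SOURCE B (Python) =====
-- def get_root_files_padding_count(size: int) -> int:
--     return (2048 - size % 2048) % 2048
-- ===== Notes on version B (the rewrite author's own statement) =====
-- stated objective: simpler
-- what changed: Replaced the float-seeded incrementing search for the smallest enclosing 2048-block with the single closed-form modular expression (2048 - size % 2048) % 2048.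
import Mathlib
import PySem

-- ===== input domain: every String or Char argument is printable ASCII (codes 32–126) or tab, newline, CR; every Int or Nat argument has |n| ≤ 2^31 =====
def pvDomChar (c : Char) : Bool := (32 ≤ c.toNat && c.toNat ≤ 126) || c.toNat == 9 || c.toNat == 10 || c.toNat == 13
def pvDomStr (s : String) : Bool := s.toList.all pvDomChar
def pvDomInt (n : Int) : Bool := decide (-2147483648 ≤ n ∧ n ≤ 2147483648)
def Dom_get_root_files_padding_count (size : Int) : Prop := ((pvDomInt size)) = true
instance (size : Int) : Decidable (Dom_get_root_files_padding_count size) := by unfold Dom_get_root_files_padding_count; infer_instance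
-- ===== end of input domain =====

-- B replaces A's float-seeded incrementing block search with one closed-form modular expression (objective: simpler); return value only.
-- ===== PORT A =====
-- the while-loop of A: increments n until size ≤ n*2048, then returns the gap
def pvLoopA (size n : Int) : Int :=
  if size ≤ n * 2048 then n * 2048 - size else pvLoopA size (n + 1)
termination_by (size - n * 2048).toNat
decreasing_by omega

-- int(size/2048): float division is exact for |size| ≤ 2^31 < 2^53, and int() truncates
-- toward zero, so on Dom this is exactly Int.tdiv (truncating division).
def get_root_files_padding_count (size : Int) : Int :=
  if PySem.Int.mod size 2048 = 0 then 0
  else pvLoopA size (Int.tdiv size 2048)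

-- ===== PORT B =====
def get_root_files_padding_count_alt (size : Int) : Int :=
  PySem.Int.mod (2048 - PySem.Int.mod size 2048) 2048

-- ===== PRECONDITION & SPEC =====
def Spec_get_root_files_padding_count (size : Int) (out : Int) : Prop := out = get_root_files_padding_count_alt size
instance (size : Int) (out : Int) : Decidable (Spec_get_root_files_padding_count size out) := by unfold Spec_get_root_files_padding_count; infer_instance

-- ===== CLAIM (what is proved, stated in full; the proofs are below) =====
def Claim_equal_get_root_files_padding_count : Prop := ∀ (size : Int), Dom_get_root_files_padding_count size → Spec_get_root_files_padding_count size (get_root_files_padding_count size)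

-- ===== LEMMAS AND PROOFS =====

-- ===== VERDICT (by name: the statement is the Claim_ definition above) =====
-- loop invariant: if n is at most the index of the least 2048-multiple ≥ size (and size is
-- not a multiple), the loop returns that multiple minus size
theorem pvLoopA_eq (size n : Int) (hmod : size % 2048 ≠ 0)
    (hn : n ≤ size / 2048 + 1) : pvLoopA size n = (size / 2048 + 1) * 2048 - size := by
  have hlt : size % 2048 < 2048 := Int.emod_lt_of_pos size (by norm_num)
  have hge : 0 ≤ size % 2048 := Int.emod_nonneg size (by norm_num)
  have hdecomp := Int.mul_ediv_add_emod size 2048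
  have key : ∀ k : Nat, ∀ n : Int, n ≤ size / 2048 + 1 →
      (size / 2048 + 1 - n).toNat = k → pvLoopA size n = (size / 2048 + 1) * 2048 - size := by
    intro k
    induction k with
    | zero =>
        intro n hle hk
        have : n = size / 2048 + 1 := by omega
        subst this
        rw [pvLoopA]
        simp only [if_pos (by omega : size ≤ (size / 2048 + 1) * 2048)]
    | succ k ih =>
        intro n hle hk
        rw [pvLoopA]
        split
        · -- size ≤ n*2048 with n ≤ size/2048: impossible unless n = size/2048+1
          rename_i hstop
          have hn' : n ≤ size / 2048 := by omega
          have : n * 2048 ≤ (size / 2048) * 2048 := by nlinarith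
          omega
        · exact ih (n + 1) (by omega) (by omega)
  exact key _ n hn rfl

theorem get_root_files_padding_count_spec : Claim_equal_get_root_files_padding_count := by
  intro size _
  unfold Spec_get_root_files_padding_count get_root_files_padding_count get_root_files_padding_count_alt
  have hmod : PySem.Int.mod size 2048 = size % 2048 :=
    PySem.Int.mod_eq_emod_of_pos (by norm_num)
  have hlt : size % 2048 < 2048 := Int.emod_lt_of_pos size (by norm_num)
  have hge : 0 ≤ size % 2048 := Int.emod_nonneg size (by norm_num)
  rw [hmod, PySem.Int.mod_eq_emod_of_pos (b := 2048) (by norm_num)]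
  by_cases h0 : size % 2048 = 0
  · simp [h0]
  · simp only [if_neg h0]
    have hdecomp := Int.mul_ediv_add_emod size 2048
    have htdiv : size.tdiv 2048 ≤ size / 2048 + 1 := by
      by_cases hs : 0 ≤ size
      · rw [Int.tdiv_eq_ediv_of_nonneg hs]; omega
      · have h1 : size.tdiv 2048 = -((-size).tdiv 2048) := by
          rw [← Int.neg_tdiv, neg_neg]
        rw [h1, Int.tdiv_eq_ediv_of_nonneg (by omega)]
        have h2 := Int.mul_ediv_add_emod (-size) 2048
        have h3 : 0 ≤ (-size) % 2048 := Int.emod_nonneg _ (by norm_num)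
        have h4 : (-size) % 2048 < 2048 := Int.emod_lt_of_pos _ (by norm_num)
        omega
    rw [pvLoopA_eq size _ h0 htdiv]
    have : (2048 - size % 2048) % 2048 = 2048 - size % 2048 :=
      Int.emod_eq_of_lt (by omega) (by omega)
    omega
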